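-- pv_equiv track=rewrite | github.com/ICSE2025asd/TICBert | TextProcess/processOp.py | splitCamelWordAndConvertLower
-- ===== SOURCE A (Python) =====
-- def splitCamelWordAndConvertLower(word):
--     """
--     Used for processing camel naming method
--     :param word: str, origin word
--     :return: word_list: list
--     """
--     word_list = []
--     cur = ''
--     for c in word:
--         if 'A' <= c <= 'Z':
--             if len(cur) > 0:
--                 word_list.append(cur.lower())
--             cur = ''
--         cur += c
--     if len(cur) > 0:
--         word_list.append(cur.lower())
--     return word_list
-- ===== SOURCE B (Python) =====
-- def splitCamelWordAndConvertLower(word):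
--     """
--     Used for processing camel naming method
--     :param word: str, origin word
--     :return: word_list: list
--     """
--     starts = [i for i, c in enumerate(word) if 'A' <= c <= 'Z']
--     bounds = [0] + starts + [len(word)]
--     return [word[a:b].lower() for a, b in zip(bounds, bounds[1:]) if a < b]
-- ===== Notes on version B (the rewrite author's own statement) =====
-- stated objective: alternative
-- what changed: B first collects the indices of uppercase ASCII letters, builds the boundary list [0]+indices+[len(word)], and then slices the word between consecutive boundaries (dropping empty slices), replacing A's character-accumulator loop.
import Mathlib
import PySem

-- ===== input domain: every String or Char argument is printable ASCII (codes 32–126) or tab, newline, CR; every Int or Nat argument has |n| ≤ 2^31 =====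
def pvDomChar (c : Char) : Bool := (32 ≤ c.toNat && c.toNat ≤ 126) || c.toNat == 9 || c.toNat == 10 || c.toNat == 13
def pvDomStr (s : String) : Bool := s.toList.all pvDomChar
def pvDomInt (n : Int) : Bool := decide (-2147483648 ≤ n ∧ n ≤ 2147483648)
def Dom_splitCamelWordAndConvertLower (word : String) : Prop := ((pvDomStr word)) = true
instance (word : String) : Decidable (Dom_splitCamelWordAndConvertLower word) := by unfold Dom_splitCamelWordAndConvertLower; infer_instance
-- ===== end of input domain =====

-- B replaces A's character-accumulator loop by an index-first decomposition (collect uppercase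
-- positions, then slice between consecutive boundaries); same cost, different structure.

-- ===== PORT A =====
-- Python strings are handled as code-point lists; cur += c becomes list append; cur.lower() is PySem.Chars.lower.
def splitCamelWordAndConvertLower (word : String) : List String :=
  let st := word.toList.foldl
    (fun (acc : List String × List Char) c =>
      let acc' :=
        if 'A' ≤ c ∧ c ≤ 'Z' then
          ((if 0 < acc.2.length then acc.1 ++ [String.ofList (PySem.Chars.lower acc.2)] else acc.1),
           ([] : List Char))
        else acc
      (acc'.1, acc'.2 ++ [c]))
    ([], [])
  if 0 < st.2.length then st.1 ++ [String.ofList (PySem.Chars.lower st.2)] else st.1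

-- ===== PORT B =====
def splitCamelWordAndConvertLower_alt (word : String) : List String :=
  let cs := word.toList
  let starts : List Int :=
    (PySem.List.enumerate cs 0).filterMap
      (fun p => if 'A' ≤ p.2 ∧ p.2 ≤ 'Z' then some p.1 else none)
  let bounds : List Int := 0 :: (starts ++ [(cs.length : Int)])
  (bounds.zip bounds.tail).filterMap (fun ab =>
    if ab.1 < ab.2 then
      some (String.ofList (PySem.Chars.lower (PySem.List.slice cs (some ab.1) (some ab.2))))
    else none)

-- ===== PRECONDITION & SPEC =====
def Spec_splitCamelWordAndConvertLower (word : String) (out : List String) : Prop := out = splitCamelWordAndConvertLower_alt word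
instance (word : String) (out : List String) : Decidable (Spec_splitCamelWordAndConvertLower word out) := by unfold Spec_splitCamelWordAndConvertLower; infer_instance

-- ===== CLAIM (what is proved, stated in full; the proofs are below) =====
def Claim_equal_splitCamelWordAndConvertLower : Prop := ∀ (word : String), Dom_splitCamelWordAndConvertLower word → Spec_splitCamelWordAndConvertLower word (splitCamelWordAndConvertLower word)

-- ===== LEMMAS AND PROOFS =====

-- segments of A's loop, with pending chunk cur
def pvSegs : List Char → List Char → List (List Char)
  | cur, [] => if 0 < cur.length then [cur] else []
  | cur, c :: cs =>
    if 'A' ≤ c ∧ c ≤ 'Z' then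
      (if 0 < cur.length then [cur] else []) ++ pvSegs [c] cs
    else pvSegs (cur ++ [c]) cs

-- positions of uppercase letters
def pvUps : List Char → List Nat
  | [] => []
  | c :: cs => (if 'A' ≤ c ∧ c ≤ 'Z' then [0] else []) ++ (pvUps cs).map (· + 1)

-- slices between consecutive boundaries (Nat form of B's comprehension)
def pvChunks (cs : List Char) (bs : List Nat) : List (List Char) :=
  (bs.zip bs.tail).filterMap
    (fun ab => if ab.1 < ab.2 then some ((cs.drop ab.1).take (ab.2 - ab.1)) else none)

lemma pvChunks_cons (cs : List Char) (a b : Nat) (bs : List Nat) :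
    pvChunks cs (a :: b :: bs)
      = (if a < b then [(cs.drop a).take (b - a)] else []) ++ pvChunks cs (b :: bs) := by
  unfold pvChunks
  simp only [List.tail_cons, List.zip_cons_cons, List.filterMap_cons]
  by_cases h : a < b
  · simp [h]
  · simp [h]

lemma pvChunks_map_add (pre ds : List Char) (bs : List Nat) :
    pvChunks (pre ++ ds) (bs.map (· + pre.length)) = pvChunks ds bs := by
  unfold pvChunks
  rw [show (bs.map (· + pre.length)).tail = bs.tail.map (· + pre.length) by
        cases bs <;> simp]
  rw [List.zip_map, List.filterMap_map]
  apply List.filterMap_congr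
  intro ab _
  rcases ab with ⟨a, b⟩
  have hd : (pre ++ ds).drop (a + pre.length) = ds.drop a := by
    rw [List.drop_append, List.drop_eq_nil_of_le (by omega : pre.length ≤ a + pre.length)]
    rw [List.nil_append]
    congr 1
    omega
  by_cases h : a < b
  · have h' : a + pre.length < b + pre.length := by omega
    have ht : b + pre.length - (a + pre.length) = b - a := by omega
    simp only [Prod.map, Function.comp_apply, if_pos h, if_pos h', hd, ht]
  · have h' : ¬ a + pre.length < b + pre.length := by omega
    simp only [Prod.map, Function.comp_apply, if_neg h, if_neg h']

lemma pvChunks_eq_pvSegs : ∀ (cs cur : List Char),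
    pvChunks (cur ++ cs) (0 :: ((pvUps cs).map (· + cur.length) ++ [cur.length + cs.length]))
      = pvSegs cur cs := by
  intro cs
  induction cs with
  | nil =>
    intro cur
    simp only [pvUps, List.map_nil, List.nil_append, List.length_nil, Nat.add_zero,
      List.append_nil, pvSegs]
    rw [pvChunks_cons]
    by_cases h : 0 < cur.length
    · simp [pvChunks, h]
    · simp [pvChunks, h]
  | cons c cs ih =>
    intro cur
    by_cases hc : 'A' ≤ c ∧ c ≤ 'Z'
    · have hups : pvUps (c :: cs) = 0 :: (pvUps cs).map (· + 1) := by
        simp [pvUps, if_pos hc]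
      rw [hups]
      have e : (0 :: ((0 :: (pvUps cs).map (· + 1)).map (· + cur.length)
              ++ [cur.length + (c :: cs).length]))
          = 0 :: cur.length
              :: (((pvUps cs).map (· + 1) ++ [1 + cs.length]).map (· + cur.length)) := by
        simp only [List.map_cons, List.map_append, List.length_cons, List.map_map,
          List.map_nil]
        rw [show (0 : Nat) + cur.length = cur.length by omega,
          show cur.length + (cs.length + 1) = 1 + cs.length + cur.length by omega]
        simp
      rw [e, pvChunks_cons]
      have e2 : (cur.length :: (((pvUps cs).map (· + 1) ++ [1 + cs.length]).map (· + cur.length)))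
          = (0 :: ((pvUps cs).map (· + 1) ++ [1 + cs.length])).map (· + cur.length) := by
        simp
      rw [e2, show cur ++ c :: cs = cur ++ ([c] ++ cs) from rfl,
        pvChunks_map_add cur ([c] ++ cs) (0 :: ((pvUps cs).map (· + 1) ++ [1 + cs.length]))]
      have hih : pvChunks ([c] ++ cs) (0 :: ((pvUps cs).map (· + 1) ++ [1 + cs.length]))
          = pvSegs [c] cs := ih [c]
      rw [hih]
      simp only [pvSegs, if_pos hc]
      by_cases h : 0 < cur.length
      · simp [h]
      · simp [h]
    · have hups : pvUps (c :: cs) = (pvUps cs).map (· + 1) := by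
        simp [pvUps, if_neg hc]
      rw [hups]
      have h1 : ((pvUps cs).map (· + 1)).map (· + cur.length)
          = (pvUps cs).map (· + (cur ++ [c]).length) := by
        rw [List.map_map]
        apply List.map_congr_left
        intro k _
        simp only [Function.comp_apply, List.length_append, List.length_cons, List.length_nil]
        omega
      have h2 : cur.length + (c :: cs).length = (cur ++ [c]).length + cs.length := by
        simp only [List.length_append, List.length_cons, List.length_nil]
        omega
      rw [h1, h2, show cur ++ c :: cs = (cur ++ [c]) ++ cs by simp, ih (cur ++ [c])]
      simp [pvSegs, if_neg hc]

-- A's fold equals pvSegs with the lowering mapped over the segments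
lemma pvA_fold_eq : ∀ (cs : List Char) (wl : List String) (cur : List Char),
    (let st := cs.foldl
        (fun (acc : List String × List Char) c =>
          let acc' :=
            if 'A' ≤ c ∧ c ≤ 'Z' then
              ((if 0 < acc.2.length then acc.1 ++ [String.ofList (PySem.Chars.lower acc.2)] else acc.1),
               ([] : List Char))
            else acc
          (acc'.1, acc'.2 ++ [c]))
        (wl, cur)
      if 0 < st.2.length then st.1 ++ [String.ofList (PySem.Chars.lower st.2)] else st.1)
      = wl ++ (pvSegs cur cs).map (fun s => String.ofList (PySem.Chars.lower s)) := by
  intro cs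
  induction cs with
  | nil =>
    intro wl cur
    simp only [List.foldl_nil, pvSegs]
    by_cases h : 0 < cur.length
    · simp [h]
    · simp [h]
  | cons c cs ih =>
    intro wl cur
    simp only [List.foldl_cons]
    by_cases hc : 'A' ≤ c ∧ c ≤ 'Z'
    · simp only [if_pos hc]
      by_cases h : 0 < cur.length
      · simp only [if_pos h, List.nil_append]
        rw [ih]
        simp [pvSegs, if_pos hc, if_pos h]
      · simp only [if_neg h, List.nil_append]
        rw [ih]
        simp [pvSegs, if_pos hc, if_neg h]
    · simp only [if_neg hc]
      rw [ih]
      simp [pvSegs, if_neg hc]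

-- B's enumerate-filterMap computes the uppercase positions
lemma pvEnum_eq : ∀ (cs : List Char) (s : Int),
    (PySem.List.enumerate cs s).filterMap
        (fun p => if 'A' ≤ p.2 ∧ p.2 ≤ 'Z' then some p.1 else none)
      = (pvUps cs).map (fun k : Nat => s + (k : Int)) := by
  intro cs
  induction cs with
  | nil => intro s; simp [PySem.List.enumerate_nil, pvUps]
  | cons c cs ih =>
    intro s
    rw [PySem.List.enumerate_cons, List.filterMap_cons]
    have hmap : (pvUps cs).map (fun k : Nat => (s + 1) + (k : Int))
        = ((pvUps cs).map (· + 1)).map (fun k : Nat => s + (k : Int)) := by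
      rw [List.map_map]
      apply List.map_congr_left
      intro k _
      simp only [Function.comp_apply]
      push_cast
      ring
    by_cases hc : 'A' ≤ c ∧ c ≤ 'Z'
    · simp only [if_pos hc, ih (s + 1), hmap, pvUps]
      simp
    · simp only [if_neg hc, ih (s + 1), hmap, pvUps]
      simp

-- B's port equals pvChunks at Nat boundaries, lowered
lemma pvB_eq (word : String) :
    splitCamelWordAndConvertLower_alt word
      = (pvChunks word.toList (0 :: (pvUps word.toList ++ [word.toList.length]))).map
          (fun s => String.ofList (PySem.Chars.lower s)) := by
  simp only [splitCamelWordAndConvertLower_alt]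
  rw [pvEnum_eq]
  have hcast : ((0 : Int) :: ((pvUps word.toList).map (fun k : Nat => (0 : Int) + (k : Int))
        ++ [(word.toList.length : Int)]))
      = (0 :: (pvUps word.toList ++ [word.toList.length])).map (fun k : Nat => (k : Int)) := by
    simp
  rw [hcast]
  rw [show ((0 :: (pvUps word.toList ++ [word.toList.length])).map
        (fun k : Nat => (k : Int))).tail
      = (0 :: (pvUps word.toList ++ [word.toList.length])).tail.map (fun k : Nat => (k : Int)) by
    simp]
  rw [List.zip_map, List.filterMap_map]
  unfold pvChunks
  rw [List.map_filterMap]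
  apply List.filterMap_congr
  intro ab _
  rcases ab with ⟨a, b⟩
  by_cases h : a < b
  · have h' : (a : Int) < (b : Int) := by exact_mod_cast h
    simp only [Prod.map, Function.comp_apply, if_pos h, if_pos h', Option.map_some,
      PySem.List.slice_natCast]
  · have h' : ¬ (a : Int) < (b : Int) := by exact_mod_cast h
    simp only [Prod.map, Function.comp_apply, if_neg h, if_neg h', Option.map_none]

-- ===== VERDICT (by name: the statement is the Claim_ definition above) =====
theorem splitCamelWordAndConvertLower_spec : Claim_equal_splitCamelWordAndConvertLower := by
  intro word _
  show splitCamelWordAndConvertLower word = splitCamelWordAndConvertLower_alt word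
  rw [pvB_eq]
  unfold splitCamelWordAndConvertLower
  rw [pvA_fold_eq word.toList [] []]
  have h := pvChunks_eq_pvSegs word.toList []
  simp only [List.length_nil, List.nil_append] at h
  rw [show (pvUps word.toList).map (· + 0) = pvUps word.toList by simp] at h
  rw [show (0 : Nat) + word.toList.length = word.toList.length by omega] at h
  rw [h]
  simp
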